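-- pv_equiv track=rewrite | github.com/Appropedia/mw-unused-image-finder | modules/model/view/review_details.py | _sql_filter_params
-- ===== SOURCE A (Python) =====
-- def _sql_filter_params(filter_params: dict[str, str]) -> tuple[list[str], list[str], list[any]]:
--   filter_joins = []
--   filter_conditions = []
--   filter_values = []
--   for param, value in filter_params.items():
--     match param:
--       case 'review_author':
--         #For direct string matches, use an equality expression and apend the input value as is
--         filter_conditions.append('user_name = ?')
--         filter_values.append(value)
--       case 'cleanup_action':
--         filter_conditions.append('cleanup_action_name = ?')
--         filter_values.append(value)
--       case 'cleanup_reason':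
--         filter_conditions.append('cleanup_reason_name = ?')
--         filter_values.append(value)
--       case 'image_title':
--         #For text searches, use a LIKE/ESCAPE expression with a pattern that matches any part of the
--         #string after the namespace (e.g. 'File:'), while escaping any potential wildcard character
--         #in the input string
--         filter_conditions.append("SUBSTR(image_title, INSTR(image_title, ':') + 1) LIKE ? ESCAPE ?")
--         filter_values.append('%{}%'.format(value.translate(str.maketrans({ '\\': r'\\',
--                                                                            '%':  r'\%',
--                                                                            '_':  r'\_' }))))
--         filter_values.append('\\')
--       case 'newest_only':
--         #Filter to get the newest review of each image by performing an inner join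
--         filter_joins.append(
--           'INNER JOIN (SELECT id AS ordered_image_review_id, '
--           'ROW_NUMBER() OVER (PARTITION BY image_id ORDER BY timestamp DESC, id DESC) AS row_num '
--           'FROM image_reviews) ON image_review_id = ordered_image_review_id AND row_num = 1')
--         #Note: In the extremely rare case of a tie between two reviews sharing the same timestamp,
--         #the one with the largest image_review_id will be chosen
--       case _ as invalid_param:
--         raise ValueError(f'Invalid filter parameter name: {invalid_param}')
--
--   return filter_joins, filter_conditions, filter_values
-- ===== SOURCE B (Python) =====
-- _EQ_COLUMNS = {
--     'review_author': 'user_name',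
--     'cleanup_action': 'cleanup_action_name',
--     'cleanup_reason': 'cleanup_reason_name',
-- }
--
-- _NEWEST_JOIN = ('INNER JOIN (SELECT id AS ordered_image_review_id, '
--                 'ROW_NUMBER() OVER (PARTITION BY image_id ORDER BY timestamp DESC, id DESC) AS row_num '
--                 'FROM image_reviews) ON image_review_id = ordered_image_review_id AND row_num = 1')
--
-- _LIKE_CONDITION = "SUBSTR(image_title, INSTR(image_title, ':') + 1) LIKE ? ESCAPE ?"
--
--
-- def _escape_like(value):
--     return ''.join('\\' + c if c in '\\%_' else c for c in value)
--
--
-- def _sql_filter_params(filter_params):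
--     items = list(filter_params.items())
--     # staged passes: validate first, then build each of the three lists independently
--     for param, _ in items:
--         if param not in _EQ_COLUMNS and param not in ('image_title', 'newest_only'):
--             raise ValueError(f'Invalid filter parameter name: {param}')
--     joins = [_NEWEST_JOIN for param, _ in items if param == 'newest_only']
--     conditions = [_EQ_COLUMNS[param] + ' = ?' if param in _EQ_COLUMNS else _LIKE_CONDITION
--                   for param, _ in items if param != 'newest_only']
--     values = [v for param, value in items if param != 'newest_only'
--                 for v in ([value] if param in _EQ_COLUMNS
--                           else ['%' + _escape_like(value) + '%', '\\'])]
--     return joins, conditions, values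
-- ===== Notes on version B (the rewrite author's own statement) =====
-- stated objective: alternative
-- what changed: Replaces A's single loop appending into three accumulators with staged passes: one validation pass, then each of joins, conditions and values is built by its own independent comprehension over the params (table-driven for the equality columns); LIKE-escaping is a per-character comprehension instead of str.translate/maketrans.
import Mathlib
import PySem

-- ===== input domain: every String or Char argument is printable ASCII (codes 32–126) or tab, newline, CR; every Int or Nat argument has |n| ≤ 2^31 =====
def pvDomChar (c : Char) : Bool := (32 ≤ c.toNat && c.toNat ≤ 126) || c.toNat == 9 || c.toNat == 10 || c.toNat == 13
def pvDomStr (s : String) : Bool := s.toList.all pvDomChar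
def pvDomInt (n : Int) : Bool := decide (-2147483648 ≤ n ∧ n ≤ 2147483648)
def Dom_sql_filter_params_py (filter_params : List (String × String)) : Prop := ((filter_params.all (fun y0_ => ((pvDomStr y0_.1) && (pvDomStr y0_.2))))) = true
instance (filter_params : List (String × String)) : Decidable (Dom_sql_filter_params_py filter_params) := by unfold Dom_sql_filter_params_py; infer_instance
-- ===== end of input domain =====

-- B replaces A's single three-accumulator append loop with staged passes: a validation pass,
-- then joins, conditions and values each built by its own comprehension (objective: alternative).

-- ===== PORT A =====

-- A's shared literal strings
def pvLikeCond : String := "SUBSTR(image_title, INSTR(image_title, ':') + 1) LIKE ? ESCAPE ?"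
def pvNewestJoin : String :=
  "INNER JOIN (SELECT id AS ordered_image_review_id, ROW_NUMBER() OVER (PARTITION BY image_id ORDER BY timestamp DESC, id DESC) AS row_num FROM image_reviews) ON image_review_id = ordered_image_review_id AND row_num = 1"

-- hand port of value.translate(str.maketrans({'\\': r'\\', '%': r'\%', '_': r'\_'})):
-- exact — translate maps each char independently to its replacement string.
def pvTranslateEsc (value : String) : String :=
  String.ofList (value.toList.flatMap (fun c =>
    if c = '\\' then ['\\', '\\']
    else if c = '%' then ['\\', '%']
    else if c = '_' then ['\\', '_']
    else [c]))

-- one iteration of A's for-loop over the state (filter_joins, filter_conditions, filter_values)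
def pvAStep (st : List String × List String × List String) (pv : String × String) :
    List String × List String × List String :=
  let (joins, conds, vals) := st
  let (param, value) := pv
  if param = "review_author" then (joins, conds ++ ["user_name = ?"], vals ++ [value])
  else if param = "cleanup_action" then (joins, conds ++ ["cleanup_action_name = ?"], vals ++ [value])
  else if param = "cleanup_reason" then (joins, conds ++ ["cleanup_reason_name = ?"], vals ++ [value])
  else if param = "image_title" then
    (joins, conds ++ [pvLikeCond], vals ++ ["%" ++ pvTranslateEsc value ++ "%", "\\"])
  else if param = "newest_only" then (joins ++ [pvNewestJoin], conds, vals)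
  else (joins, conds, vals)  -- A raises ValueError here; excluded by Pre_

def sql_filter_params_py (filter_params : List (String × String)) : List String × List String × List String :=
  filter_params.foldl pvAStep ([], [], [])

-- ===== PORT B =====

-- B's module-level dict _EQ_COLUMNS
def pvEqColumns : PySem.Dict String String :=
  PySem.Dict.ofList [("review_author", "user_name"),
                     ("cleanup_action", "cleanup_action_name"),
                     ("cleanup_reason", "cleanup_reason_name")]

-- ''.join('\\' + c if c in '\\%_' else c for c in value)  (hand port; exact: chars are independent)
def pvEscapeLike (value : String) : String :=
  String.ofList (value.toList.flatMap (fun c => if c ∈ ['\\', '%', '_'] then ['\\', c] else [c]))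

-- joins pass: [_NEWEST_JOIN for param, _ in items if param == 'newest_only']
def pvJoinsPass (items : List (String × String)) : List String :=
  (items.filter (fun pv => pv.1 = "newest_only")).map (fun _ => pvNewestJoin)

-- conditions pass (the validation pass guarantees every non-newest key is an EQ key or 'image_title')
def pvCondsPass (items : List (String × String)) : List String :=
  (items.filter (fun pv => pv.1 ≠ "newest_only")).map (fun pv =>
    match PySem.Dict.get? pvEqColumns pv.1 with
    | some col => col ++ " = ?"
    | none => pvLikeCond)

-- values pass
def pvValsPass (items : List (String × String)) : List String :=
  (items.filter (fun pv => pv.1 ≠ "newest_only")).flatMap (fun pv =>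
    match PySem.Dict.get? pvEqColumns pv.1 with
    | some _ => [pv.2]
    | none => ["%" ++ pvEscapeLike pv.2 ++ "%", "\\"])

def sql_filter_params_py_alt (filter_params : List (String × String)) : List String × List String × List String :=
  (pvJoinsPass filter_params, pvCondsPass filter_params, pvValsPass filter_params)

-- ===== PRECONDITION & SPEC =====
-- Pre_ excludes exactly the inputs on which A raises ValueError: some key is not one of
-- the five recognised filter parameter names.
def Pre_sql_filter_params_py (filter_params : List (String × String)) : Prop :=
  (filter_params.all (fun pv =>
    ["review_author", "cleanup_action", "cleanup_reason", "image_title", "newest_only"].contains pv.1)) = true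
instance (filter_params : List (String × String)) : Decidable (Pre_sql_filter_params_py filter_params) := by
  unfold Pre_sql_filter_params_py; infer_instance

def pvWitness_sql_filter_params_py : (List (String × String)) :=
  [("review_author", "Alice"), ("image_title", "a_b%c"), ("newest_only", "")]

def Spec_sql_filter_params_py (filter_params : List (String × String)) (out : List String × List String × List String) : Prop := out = sql_filter_params_py_alt filter_params
instance (filter_params : List (String × String)) (out : List String × List String × List String) : Decidable (Spec_sql_filter_params_py filter_params out) := by unfold Spec_sql_filter_params_py; infer_instance

-- ===== CLAIM (what is proved, stated in full; the proofs are below) =====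
def Claim_equal_sql_filter_params_py : Prop := ∀ (filter_params : List (String × String)), Dom_sql_filter_params_py filter_params → Pre_sql_filter_params_py filter_params → Spec_sql_filter_params_py filter_params (sql_filter_params_py filter_params)

-- ===== LEMMAS AND PROOFS =====

-- the two escaping routines agree
theorem escape_eq (v : String) : pvTranslateEsc v = pvEscapeLike v := by
  unfold pvTranslateEsc pvEscapeLike
  congr 1
  apply List.flatMap_congr
  intro c _
  by_cases h1 : c = '\\' <;> by_cases h2 : c = '%' <;> by_cases h3 : c = '_' <;>
    simp_all

-- the lookups in B's table
theorem lookup_ra : PySem.Dict.get? pvEqColumns "review_author" = some "user_name" := by decide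
theorem lookup_ca : PySem.Dict.get? pvEqColumns "cleanup_action" = some "cleanup_action_name" := by decide
theorem lookup_cr : PySem.Dict.get? pvEqColumns "cleanup_reason" = some "cleanup_reason_name" := by decide
theorem lookup_it : PySem.Dict.get? pvEqColumns "image_title" = none := by decide
theorem lookup_no : PySem.Dict.get? pvEqColumns "newest_only" = none := by decide

-- on a valid parameter, one A-step appends exactly the element each of B's passes
-- contributes for that parameter
theorem step_eq (st : List String × List String × List String) (pv : String × String)
    (hv : (["review_author", "cleanup_action", "cleanup_reason", "image_title", "newest_only"] : List String).contains pv.1 = true) :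
    pvAStep st pv = (st.1 ++ pvJoinsPass [pv], st.2.1 ++ pvCondsPass [pv], st.2.2 ++ pvValsPass [pv]) := by
  obtain ⟨j, c, v⟩ := st
  obtain ⟨p, val⟩ := pv
  simp only [List.contains_eq_mem, List.mem_cons, List.not_mem_nil, or_false, decide_eq_true_eq] at hv
  rcases hv with h | h | h | h | h <;> subst h <;>
    simp [pvAStep, pvJoinsPass, pvCondsPass, pvValsPass, List.filter,
          lookup_ra, lookup_ca, lookup_cr, lookup_it, lookup_no, escape_eq]

-- each pass distributes over cons
theorem joins_cons (pv : String × String) (tl : List (String × String)) :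
    pvJoinsPass (pv :: tl) = pvJoinsPass [pv] ++ pvJoinsPass tl := by
  simp only [pvJoinsPass, List.filter_cons]; split <;> simp
theorem conds_cons (pv : String × String) (tl : List (String × String)) :
    pvCondsPass (pv :: tl) = pvCondsPass [pv] ++ pvCondsPass tl := by
  simp [pvCondsPass, List.filter]; split <;> simp
theorem vals_cons (pv : String × String) (tl : List (String × String)) :
    pvValsPass (pv :: tl) = pvValsPass [pv] ++ pvValsPass tl := by
  simp [pvValsPass, List.filter]; split <;> simp

-- generalised loop invariant: A's fold from state st ends with st extended by B's three passes
theorem fold_eq (fp : List (String × String)) (st : List String × List String × List String)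
    (hpre : Pre_sql_filter_params_py fp) :
    fp.foldl pvAStep st = (st.1 ++ pvJoinsPass fp, st.2.1 ++ pvCondsPass fp, st.2.2 ++ pvValsPass fp) := by
  induction fp generalizing st with
  | nil => simp [pvJoinsPass, pvCondsPass, pvValsPass]
  | cons hd tl ih =>
    unfold Pre_sql_filter_params_py at hpre
    simp only [List.all_cons, Bool.and_eq_true] at hpre
    rw [List.foldl_cons, ih _ hpre.2, step_eq _ _ hpre.1,
        joins_cons, conds_cons, vals_cons]
    have hj : pvJoinsPass ([] : List (String × String)) = [] := rfl
    have hc : pvCondsPass ([] : List (String × String)) = [] := rfl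
    have hv : pvValsPass ([] : List (String × String)) = [] := rfl
    simp only [joins_cons hd tl, conds_cons hd tl, vals_cons hd tl, hj, hc, hv,
               List.append_assoc, List.append_nil, List.nil_append]

-- ===== VERDICT (by name: the statement is the Claim_ definition above) =====
theorem sql_filter_params_py_spec : Claim_equal_sql_filter_params_py := by
  intro fp _ hpre
  unfold Spec_sql_filter_params_py sql_filter_params_py sql_filter_params_py_alt
  rw [fold_eq fp ([], [], []) hpre]
  simp
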